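-- pv_equiv track=rewrite | github.com/25rj617/binary-search-visualizer | app.py | binary_search_visual
-- ===== SOURCE A (Python) =====
-- def binary_search_visual(list_str, target_str):
--     # Input validation
--     try:
--         nums = [int(x.strip()) for x in list_str.split(",")]
--         target = int(target_str)
--     except:
--         return "Error: Please enter only numbers.", ""
--
--     steps = []
--     nums.sort()  # Binary search requires a sorted list
--
--     low, high = 0, len(nums) - 1
--
--     while low <= high:
--         mid = (low + high) // 2
--
--         steps.append(
--             f"Searching between indexes {low} and {high}. "
--             f"Middle index: {mid}, value: {nums[mid]}"
--         )
--
--         if nums[mid] == target: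
--             steps.append(f"Found {target} at index {mid}!")
--             return f"Found {target} at index {mid}", "\n".join(steps)
--
--         elif nums[mid] < target:
--             steps.append(f"{target} > {nums[mid]} → Searching right half")
--             low = mid + 1
--         else:
--             steps.append(f"{target} < {nums[mid]} → Searching left half")
--             high = mid - 1
--
--     steps.append("Target not found.")
--     return "Not found", "\n".join(steps)
-- ===== SOURCE B (Python) =====
-- def binary_search_visual(list_str, target_str):
--     # Same validation as the original
--     try:
--         nums = [int(x.strip()) for x in list_str.split(",")]
--         target = int(target_str)
--     except:
--         return "Error: Please enter only numbers.", ""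
--
--     nums.sort()  # Binary search requires a sorted list
--
--     # Phase 1: pure numeric search, recording only the probe data (no strings).
--     trace = []                  # list of (low, high, mid, value) probes
--     found = None                # index where target was found, or None
--     low, high = 0, len(nums) - 1
--     while low <= high:
--         mid = (low + high) // 2
--         trace.append((low, high, mid, nums[mid]))
--         if nums[mid] == target:
--             found = mid
--             break
--         if nums[mid] < target:
--             low = mid + 1
--         else:
--             high = mid - 1
--
--     # Phase 2: render the transcript from the recorded probes.
--     lines = []
--     for lo, hi, m, v in trace:
--         lines.append(
--             f"Searching between indexes {lo} and {hi}. "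
--             f"Middle index: {m}, value: {v}"
--         )
--         if v == target:
--             lines.append(f"Found {target} at index {m}!")
--         elif v < target:
--             lines.append(f"{target} > {v} → Searching right half")
--         else:
--             lines.append(f"{target} < {v} → Searching left half")
--
--     if found is None:
--         lines.append("Target not found.")
--         return "Not found", "\n".join(lines)
--     return f"Found {target} at index {found}", "\n".join(lines)
-- ===== Notes on version B (the rewrite author's own statement) =====
-- stated objective: alternative
-- what changed: A's single while-loop that interleaves the search with building the transcript strings is replaced by a two-phase pipeline: a purely numeric binary search that records (low, high, mid, value) probes plus the found index, followed by a separate rendering pass that turns the probe trace into the transcript lines.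
import Mathlib
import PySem

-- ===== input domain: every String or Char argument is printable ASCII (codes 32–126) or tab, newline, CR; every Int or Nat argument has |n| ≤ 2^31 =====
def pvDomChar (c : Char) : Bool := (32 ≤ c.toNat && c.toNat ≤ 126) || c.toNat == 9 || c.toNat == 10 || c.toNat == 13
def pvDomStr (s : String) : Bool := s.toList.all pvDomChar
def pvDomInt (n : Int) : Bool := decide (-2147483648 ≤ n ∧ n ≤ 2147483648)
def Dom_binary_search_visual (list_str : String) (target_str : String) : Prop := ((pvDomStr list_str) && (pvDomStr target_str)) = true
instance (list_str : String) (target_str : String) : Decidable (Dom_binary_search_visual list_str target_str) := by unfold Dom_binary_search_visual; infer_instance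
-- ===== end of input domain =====

-- B replaces A's single while-loop that interleaves searching with string-building by a
-- two-phase pipeline: a pure numeric search recording (low, high, mid, value) probes and the
-- found index, then a separate rendering pass producing the transcript; objective: alternative.


-- ===== PORT A =====
-- shared try/except block: nums = [int(x.strip()) for x in list_str.split(",")]; target = int(target_str)
-- (identical source lines in A and B; none = the except branch)
def pvParse (list_str : String) (target_str : String) : Option (List Int × Int) :=
  match ((PySem.Str.split? list_str ",").getD []).mapM
          (fun x => PySem.Int.ofStr? (PySem.Str.strip x)) with
  | none => none
  | some nums =>
    match PySem.Int.ofStr? target_str with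
    | none => none
    | some t => some (nums, t)

-- A's while-loop; fuel only makes the recursion structural (fuel = len(nums)+1 always
-- suffices: each iteration shrinks high-low+1, which starts at len(nums)); the index mid
-- is in range on every reachable call, so the .getD 0 default is never used.
def pvLoopA (nums : List Int) (target : Int) : Nat → Int → Int → List String → String × String
  | 0, _, _, steps => ("", PySem.Str.join "\n" steps)
  | fuel+1, low, high, steps =>
    if low ≤ high then
      let mid := PySem.Int.floordiv (low + high) 2
      let v := (PySem.List.pyGet? nums mid).getD 0
      let steps := steps ++ ["Searching between indexes " ++ PySem.Int.toStr low ++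
        " and " ++ PySem.Int.toStr high ++ ". Middle index: " ++ PySem.Int.toStr mid ++
        ", value: " ++ PySem.Int.toStr v]
      if v = target then
        let steps := steps ++ ["Found " ++ PySem.Int.toStr target ++ " at index " ++
          PySem.Int.toStr mid ++ "!"]
        ("Found " ++ PySem.Int.toStr target ++ " at index " ++ PySem.Int.toStr mid,
         PySem.Str.join "\n" steps)
      else if v < target then
        pvLoopA nums target fuel (mid + 1) high
          (steps ++ [PySem.Int.toStr target ++ " > " ++ PySem.Int.toStr v ++ " → Searching right half"])
      else
        pvLoopA nums target fuel low (mid - 1)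
          (steps ++ [PySem.Int.toStr target ++ " < " ++ PySem.Int.toStr v ++ " → Searching left half"])
    else
      ("Not found", PySem.Str.join "\n" (steps ++ ["Target not found."]))

def binary_search_visual (list_str : String) (target_str : String) : String × String :=
  match pvParse list_str target_str with
  | none => ("Error: Please enter only numbers.", "")
  | some (nums0, target) =>
    let nums := PySem.List.sorted nums0 (fun x => x)
    pvLoopA nums target (nums.length + 1) 0 ((nums.length : Int) - 1) []

-- ===== PORT B =====
-- Phase 1 of B: the numeric while-loop recording probes (low, high, mid, value) and the
-- found index; no strings here. Same fuel remark as for A's loop.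
def pvTraceB (nums : List Int) (target : Int) :
    Nat → Int → Int → List (Int × Int × Int × Int) × Option Int
  | 0, _, _ => ([], none)
  | fuel+1, low, high =>
    if low ≤ high then
      let mid := PySem.Int.floordiv (low + high) 2
      let v := (PySem.List.pyGet? nums mid).getD 0
      if v = target then ([(low, high, mid, v)], some mid)
      else
        let p := if v < target then pvTraceB nums target fuel (mid + 1) high
                 else pvTraceB nums target fuel low (mid - 1)
        ((low, high, mid, v) :: p.1, p.2)
    else ([], none)

-- Phase 2 of B: render one recorded probe into its one or two transcript lines.
def pvRenderB (target : Int) (e : Int × Int × Int × Int) : List String :=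
  let (lo, hi, m, v) := e
  ("Searching between indexes " ++ PySem.Int.toStr lo ++ " and " ++ PySem.Int.toStr hi ++
    ". Middle index: " ++ PySem.Int.toStr m ++ ", value: " ++ PySem.Int.toStr v) ::
  (if v = target then ["Found " ++ PySem.Int.toStr target ++ " at index " ++ PySem.Int.toStr m ++ "!"]
   else if v < target then [PySem.Int.toStr target ++ " > " ++ PySem.Int.toStr v ++ " → Searching right half"]
   else [PySem.Int.toStr target ++ " < " ++ PySem.Int.toStr v ++ " → Searching left half"])

def binary_search_visual_alt (list_str : String) (target_str : String) : String × String :=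
  match pvParse list_str target_str with
  | none => ("Error: Please enter only numbers.", "")
  | some (nums0, target) =>
    let nums := PySem.List.sorted nums0 (fun x => x)
    let p := pvTraceB nums target (nums.length + 1) 0 ((nums.length : Int) - 1)
    let lines := p.1.flatMap (pvRenderB target)
    match p.2 with
    | none => ("Not found", PySem.Str.join "\n" (lines ++ ["Target not found."]))
    | some m => ("Found " ++ PySem.Int.toStr target ++ " at index " ++ PySem.Int.toStr m,
                 PySem.Str.join "\n" lines)

-- ===== PRECONDITION & SPEC =====
def Spec_binary_search_visual (list_str : String) (target_str : String) (out : String × String) : Prop := out = binary_search_visual_alt list_str target_str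
instance (list_str : String) (target_str : String) (out : String × String) : Decidable (Spec_binary_search_visual list_str target_str out) := by unfold Spec_binary_search_visual; infer_instance

-- ===== CLAIM (what is proved, stated in full; the proofs are below) =====
def Claim_equal_binary_search_visual : Prop := ∀ (list_str : String) (target_str : String), Dom_binary_search_visual list_str target_str → Spec_binary_search_visual list_str target_str (binary_search_visual list_str target_str)

-- ===== LEMMAS AND PROOFS =====
-- How B assembles its final answer from a phase-1 result, after `steps` already emitted.
def pvAssemble (target : Int) (steps : List String)
    (p : List (Int × Int × Int × Int) × Option Int) : String × String :=
  let lines := steps ++ p.1.flatMap (pvRenderB target)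
  match p.2 with
  | none => ("Not found", PySem.Str.join "\n" (lines ++ ["Target not found."]))
  | some m => ("Found " ++ PySem.Int.toStr target ++ " at index " ++ PySem.Int.toStr m,
               PySem.Str.join "\n" lines)

-- Prepending one rendered probe to the assembled transcript.
theorem pvAssemble_cons (target : Int) (steps : List String) (e : Int × Int × Int × Int)
    (p : List (Int × Int × Int × Int) × Option Int) :
    pvAssemble target (steps ++ pvRenderB target e) p = pvAssemble target steps (e :: p.1, p.2) := by
  obtain ⟨tr, fnd⟩ := p
  cases fnd <;> simp [pvAssemble, List.append_assoc]

-- With sufficient fuel, A's string-accumulating loop equals B's trace-then-render pipeline.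
theorem pvLoop_eq_trace (nums : List Int) (target : Int) :
    ∀ (fuel : Nat) (low high : Int) (steps : List String), high < low + fuel →
      pvLoopA nums target (fuel + 1) low high steps =
        pvAssemble target steps (pvTraceB nums target (fuel + 1) low high) := by
  intro fuel
  induction fuel with
  | zero =>
    intro low high steps hf
    have h : ¬ low ≤ high := by omega
    rw [pvLoopA.eq_2, pvTraceB.eq_2]
    simp [pvAssemble, h]
  | succ n ih =>
    intro low high steps hf
    rw [pvLoopA.eq_2, pvTraceB.eq_2]
    by_cases h : low ≤ high
    · obtain ⟨hml, hmh⟩ := PySem.Int.floordiv_two_mid_bounds (lo := low) (hi := high) h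
      simp only [if_pos h]
      split_ifs with h1 h2
      · subst h1
        simp [pvAssemble, pvRenderB]
      · rw [ih _ _ _ (by omega)]
        have hr : pvRenderB target
            (low, high, PySem.Int.floordiv (low + high) 2,
             (PySem.List.pyGet? nums (PySem.Int.floordiv (low + high) 2)).getD 0) =
            ["Searching between indexes " ++ PySem.Int.toStr low ++
              " and " ++ PySem.Int.toStr high ++ ". Middle index: " ++
              PySem.Int.toStr (PySem.Int.floordiv (low + high) 2) ++ ", value: " ++
              PySem.Int.toStr ((PySem.List.pyGet? nums (PySem.Int.floordiv (low + high) 2)).getD 0),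
             PySem.Int.toStr target ++ " > " ++
              PySem.Int.toStr ((PySem.List.pyGet? nums (PySem.Int.floordiv (low + high) 2)).getD 0) ++
              " → Searching right half"] := by
          simp only [pvRenderB, if_neg h1, if_pos h2]
        rw [show ∀ a b : String, (steps ++ [a]) ++ [b] = steps ++ [a, b] by intro a b; simp]
        rw [← hr, pvAssemble_cons]
      · rw [ih _ _ _ (by omega)]
        have hr : pvRenderB target
            (low, high, PySem.Int.floordiv (low + high) 2,
             (PySem.List.pyGet? nums (PySem.Int.floordiv (low + high) 2)).getD 0) =
            ["Searching between indexes " ++ PySem.Int.toStr low ++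
              " and " ++ PySem.Int.toStr high ++ ". Middle index: " ++
              PySem.Int.toStr (PySem.Int.floordiv (low + high) 2) ++ ", value: " ++
              PySem.Int.toStr ((PySem.List.pyGet? nums (PySem.Int.floordiv (low + high) 2)).getD 0),
             PySem.Int.toStr target ++ " < " ++
              PySem.Int.toStr ((PySem.List.pyGet? nums (PySem.Int.floordiv (low + high) 2)).getD 0) ++
              " → Searching left half"] := by
          simp only [pvRenderB, if_neg h1, if_neg h2]
        rw [show ∀ a b : String, (steps ++ [a]) ++ [b] = steps ++ [a, b] by intro a b; simp]
        rw [← hr, pvAssemble_cons]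
    · simp [pvAssemble, h]

-- ===== VERDICT (by name: the statement is the Claim_ definition above) =====
theorem binary_search_visual_spec : Claim_equal_binary_search_visual := by
  intro list_str target_str _
  unfold Spec_binary_search_visual binary_search_visual binary_search_visual_alt
  cases h : pvParse list_str target_str with
  | none => simp
  | some p =>
    obtain ⟨nums0, target⟩ := p
    simp only []
    rw [pvLoop_eq_trace _ _ _ _ _ _ (by omega)]
    rfl
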